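-- pv_equiv track=rewrite | github.com/thanhtruc44/Rosalind_ThanhTruc | bt1.py | count_kmers
-- ===== SOURCE A (Python) =====
-- def count_kmers(sequence,k_min):
--     # Tạo dictionary rỗng để chứa trình tự kmer (key) và số lần xuất hiện (value)
--     kmer_counts = {}
--     # Duyệt phần tử từ k_min đến k = len(sequence)-1 (cuối cùng có 2 kmes)
--     for k in range(k_min, len(sequence)):
--         # Với mỗi giá trị k, duyệt phần tử từ vị trí 0 đến vị trí len - k
--         for i in range(len(sequence) - k + 1):
--             #Lấy trình tự k-mer từ vị trí thứ i độ dài k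
--             kmer = sequence[i:i+k]
--             # Chạy điều kiện nếu kmer có trong dictionary thì value cộng 1, còn lại là 1
--             if kmer in kmer_counts:
--                 kmer_counts[kmer] += 1
--             else:
--                 kmer_counts[kmer] = 1
--     # Kết quả chỉ lấy những kmer có số lần lặp lại lớn hơn hoặc bằng 2
--     kmer_counts = {kmer: count for kmer, count in kmer_counts.items() if count >= 2}
--     return kmer_counts
-- ===== SOURCE B (Python) =====
-- def count_kmers(sequence, k_min):
--     # Alternative decomposition: materialize every k-mer once, then repeatedly take the
--     # first remaining substring, count all its occurrences, and remove them (no dict counting).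
--     n = len(sequence)
--     subs = [sequence[i:i + k] for k in range(k_min, n) for i in range(n - k + 1)]
--     result = []
--     while subs:
--         s = subs[0]
--         c = subs.count(s)
--         if c >= 2:
--             result.append((s, c))
--         subs = [t for t in subs if t != s]
--     return dict(result)
-- ===== Notes on version B (the rewrite author's own statement) =====
-- stated objective: alternative
-- what changed: A counts k-mers in a dict inside two nested index loops and filters the dict at the end; B first materializes the flat list of all k-mer substrings, then repeatedly takes the first remaining substring, counts its occurrences with list.count and removes all its copies, emitting (substring, count) pairs with count >= 2 as it goes, with no counting dict.
import Mathlib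
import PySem

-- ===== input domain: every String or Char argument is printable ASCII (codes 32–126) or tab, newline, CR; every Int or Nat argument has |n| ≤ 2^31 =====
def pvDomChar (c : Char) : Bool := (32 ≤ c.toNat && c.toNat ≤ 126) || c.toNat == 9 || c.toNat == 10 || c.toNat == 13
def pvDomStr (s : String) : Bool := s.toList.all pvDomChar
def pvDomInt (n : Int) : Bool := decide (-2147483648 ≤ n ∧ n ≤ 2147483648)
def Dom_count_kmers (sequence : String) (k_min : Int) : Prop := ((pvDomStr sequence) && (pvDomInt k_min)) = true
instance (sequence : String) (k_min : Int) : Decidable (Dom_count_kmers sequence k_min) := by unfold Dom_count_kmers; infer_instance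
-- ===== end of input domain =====

-- B replaces A's dict-counting nested loops by: materialize all k-mers once, then repeatedly
-- take the first remaining substring, count its occurrences and remove them (objective: alternative).

-- ===== PORT A =====
def count_kmers (sequence : String) (k_min : Int) : List (String × Int) :=
  -- kmer_counts: the counting dict built by the two nested loops
  -- (final dict comprehension keeps the pairs with count ≥ 2)
  ((((PySem.List.pyRange k_min (PySem.Str.len sequence) 1).foldl (fun d k =>
      (PySem.List.pyRange 0 (PySem.Str.len sequence - k + 1) 1).foldl (fun d i =>
        let kmer := PySem.Str.slice sequence (some i) (some (i + k))
        if d.contains kmer then d.modify kmer 0 (· + 1) else d.insert kmer 1) d)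
      (PySem.Dict.empty : PySem.Dict String Int)).items).foldl
    (fun d p => if 2 ≤ p.2 then d.insert p.1 p.2 else d)
    (PySem.Dict.empty : PySem.Dict String Int)).items

-- ===== PORT B =====
-- the while-loop of Source B: head substring, its total count, recurse on the list with it removed
def pvRuns : List String → List (String × Int)
  | [] => []
  | s :: rest =>
    let c : Int := ((s :: rest).count s : Int)
    if 2 ≤ c then (s, c) :: pvRuns (rest.filter (fun t => t ≠ s))
    else pvRuns (rest.filter (fun t => t ≠ s))
termination_by l => l.length
decreasing_by all_goals
  simp only [List.length_unattach, List.length_cons]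
  exact Nat.lt_succ_of_le (le_trans (List.length_filter_le _ _) (by simp))

def count_kmers_alt (sequence : String) (k_min : Int) : List (String × Int) :=
  let n := PySem.Str.len sequence
  let subs := (PySem.List.pyRange k_min n 1).flatMap (fun k =>
      (PySem.List.pyRange 0 (n - k + 1) 1).map (fun i =>
        PySem.Str.slice sequence (some i) (some (i + k))))
  (PySem.Dict.ofList (pvRuns subs)).items

-- ===== PRECONDITION & SPEC =====
def Spec_count_kmers (sequence : String) (k_min : Int) (out : List (String × Int)) : Prop := out = count_kmers_alt sequence k_min
instance (sequence : String) (k_min : Int) (out : List (String × Int)) : Decidable (Spec_count_kmers sequence k_min out) := by unfold Spec_count_kmers; infer_instance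

-- ===== CLAIM (what is proved, stated in full; the proofs are below) =====
def Claim_equal_count_kmers : Prop := ∀ (sequence : String) (k_min : Int), Dom_count_kmers sequence k_min → Spec_count_kmers sequence k_min (count_kmers sequence k_min)

-- ===== LEMMAS AND PROOFS =====

-- the flat list of all substrings both programs enumerate (proof-side name)
def pvSubs (sequence : String) (k_min : Int) : List String :=
  (PySem.List.pyRange k_min (PySem.Str.len sequence) 1).flatMap (fun k =>
      (PySem.List.pyRange 0 (PySem.Str.len sequence - k + 1) 1).map (fun i =>
        PySem.Str.slice sequence (some i) (some (i + k))))

-- canonical value of both programs on an arbitrary substring list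
def pvCanon (l : List String) : List (String × Int) :=
  ((PySem.Set.ofList l).map (fun k => (k, (List.count k l : Int)))).filter
    (fun p => decide (2 ≤ p.2))

lemma pv_foldl_add_filter (l : List String) : ∀ (acc : PySem.Set String) (y : String), y ∈ acc →
    List.foldl PySem.Set.add acc l = List.foldl PySem.Set.add acc (l.filter (fun t => t ≠ y)) := by
  induction l with
  | nil => intro acc y _; rfl
  | cons x l ih =>
    intro acc y hy
    by_cases hxy : x = y
    · subst hxy
      have hc : PySem.Set.contains acc x = true := by
        simp [PySem.Set.contains]; exact hy
      simp only [List.filter_cons]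
      simp only [List.foldl_cons, PySem.Set.add, hc]
      simpa using ih acc x hy
    · simp only [List.filter_cons]
      have : (decide (x ≠ y)) = true := by simp [hxy]
      rw [this]
      simp only [List.foldl_cons]
      apply ih _ y
      simp only [PySem.Set.add]
      split
      · exact hy
      · exact List.mem_append_left _ hy

lemma pv_foldl_add_prefix (l : List String) : ∀ (pre acc : List String), (∀ y ∈ l, y ∉ pre) →
    List.foldl PySem.Set.add (pre ++ acc) l = pre ++ List.foldl PySem.Set.add acc l := by
  induction l with
  | nil => intro pre acc _; rfl
  | cons x l ih =>
    intro pre acc h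
    have hx : x ∉ pre := h x (List.mem_cons_self ..)
    have hcc : PySem.Set.contains (pre ++ acc : List String) x = PySem.Set.contains acc x := by
      simp [PySem.Set.contains, hx]
    simp only [List.foldl_cons, PySem.Set.add, hcc]
    by_cases hc : PySem.Set.contains acc x = true
    · rw [if_pos hc, if_pos hc]
      exact ih pre acc (fun y hy => h y (List.mem_cons_of_mem _ hy))
    · rw [if_neg hc, if_neg hc, List.append_assoc]
      exact ih pre (acc ++ [x]) (fun y hy => h y (List.mem_cons_of_mem _ hy))

lemma pv_ofList_cons (s : String) (rest : List String) :
    PySem.Set.ofList (s :: rest) = s :: PySem.Set.ofList (rest.filter (fun t => t ≠ s)) := by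
  have h0 : PySem.Set.ofList (s :: rest)
      = List.foldl PySem.Set.add ([s] ++ ([] : List String)) rest := by
    simp [PySem.Set.ofList, PySem.Set.add, PySem.Set.empty, PySem.Set.contains]
  rw [h0, pv_foldl_add_filter rest ([s] ++ []) s (by simp)]
  rw [pv_foldl_add_prefix _ [s] []
    (by intro y hy; simp at hy ⊢; exact hy.2)]
  rfl

lemma pvRuns_eq_canon : ∀ (n : Nat) (l : List String), l.length ≤ n → pvRuns l = pvCanon l := by
  intro n
  induction n with
  | zero =>
    intro l hl
    have : l = [] := List.eq_nil_of_length_eq_zero (Nat.le_zero.mp hl)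
    subst this
    rw [pvRuns]
    rfl
  | succ n ih =>
    intro l hl
    cases l with
    | nil => rw [pvRuns]; rfl
    | cons s rest =>
      have hlen : (rest.filter (fun t => t ≠ s)).length ≤ n := by
        have := List.length_filter_le (fun t => decide (t ≠ s)) rest
        simp at hl; omega
      have hIH := ih _ hlen
      have htail :
          (PySem.Set.ofList (rest.filter (fun t => t ≠ s))).map
              (fun k => (k, (List.count k (s :: rest) : Int)))
            = (PySem.Set.ofList (rest.filter (fun t => t ≠ s))).map
              (fun k => (k, (List.count k (rest.filter (fun t => t ≠ s)) : Int))) := by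
        apply List.map_congr_left
        intro k hk
        have hk' : k ∈ rest.filter (fun t => t ≠ s) := (PySem.Set.mem_ofList _ _).mp hk
        have hks : k ≠ s := by
          have := List.of_mem_filter hk'
          simpa using this
        have h1 : List.count k (s :: rest) = List.count k rest :=
          List.count_cons_of_ne (Ne.symm hks)
        have h2 : List.count k (rest.filter (fun t => t ≠ s)) = List.count k rest :=
          List.count_filter (by simpa using hks)
        rw [h1, h2]
      have hcanon : pvCanon (s :: rest)
          = (if 2 ≤ (List.count s (s :: rest) : Int)
              then (s, (List.count s (s :: rest) : Int)) :: pvCanon (rest.filter (fun t => t ≠ s))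
              else pvCanon (rest.filter (fun t => t ≠ s))) := by
        unfold pvCanon
        rw [pv_ofList_cons, List.map_cons, htail, List.filter_cons]
        by_cases hc : 2 ≤ (List.count s (s :: rest) : Int)
        · rw [if_pos hc]
          simp only [decide_eq_true hc]
          exact if_pos trivial
        · rw [if_neg hc]
          simp only [decide_eq_false hc]
          exact if_neg (by simp)
      rw [pvRuns, hcanon, hIH]

lemma pv_foldl_if_filter (l : List (String × Int)) : ∀ (d : PySem.Dict String Int),
    l.foldl (fun d p => if 2 ≤ p.2 then d.insert p.1 p.2 else d) d
      = (l.filter (fun p => decide (2 ≤ p.2))).foldl (fun d p => d.insert p.1 p.2) d := by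
  induction l with
  | nil => intro d; rfl
  | cons p l ih =>
    intro d
    by_cases hp : 2 ≤ p.2
    · simp only [List.foldl_cons, List.filter_cons, if_pos hp, decide_eq_true hp]
      exact ih _
    · simp only [List.foldl_cons, List.filter_cons, if_neg hp]
      rw [decide_eq_false hp]
      exact ih d

lemma pv_items_fresh (l : List (String × Int)) (h : (l.map (·.1)).Nodup) :
    (l.foldl (fun d p => d.insert p.1 p.2) (PySem.Dict.empty : PySem.Dict String Int)).items = l := by
  have := PySem.Dict.items_foldl_insert_fresh l (fun p => p.1) (fun p => p.2) PySem.Dict.empty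
    (fun a _ => PySem.Dict.contains_empty _) h
  simpa using this

lemma pv_nodup_fst_canon (l : List String) : ((pvCanon l).map (·.1)).Nodup := by
  have hsub : List.Sublist ((pvCanon l).map (·.1))
      (((PySem.Set.ofList l).map (fun k => (k, (List.count k l : Int)))).map (·.1)) :=
    (List.filter_sublist).map _
  have hmap : (((PySem.Set.ofList l).map (fun k => (k, (List.count k l : Int)))).map
      (·.1 : String × Int → String)) = PySem.Set.ofList l := by
    rw [List.map_map]
    exact List.map_id _
  rw [hmap] at hsub
  exact List.Nodup.sublist hsub (PySem.Set.nodup_ofList l)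

lemma pv_stepA (d : PySem.Dict String Int) (kmer : String) :
    (if d.contains kmer then d.modify kmer 0 (· + 1) else d.insert kmer 1)
      = d.modify kmer 0 (· + 1) := by
  by_cases h : d.contains kmer = true
  · rw [if_pos h]
  · rw [if_neg (by simp [h])]
    simp [PySem.Dict.modify, PySem.Dict.getD_of_not_contains d 0 (by simpa using h)]

lemma pv_A_eq_canon (sequence : String) (k_min : Int) :
    count_kmers sequence k_min = pvCanon (pvSubs sequence k_min) := by
  unfold count_kmers
  have hfun : (fun (d : PySem.Dict String Int) (k : Int) =>
        (PySem.List.pyRange 0 (PySem.Str.len sequence - k + 1) 1).foldl (fun d i =>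
          let kmer := PySem.Str.slice sequence (some i) (some (i + k))
          if d.contains kmer then d.modify kmer 0 (· + 1) else d.insert kmer 1) d)
      = (fun (d : PySem.Dict String Int) (k : Int) =>
          ((PySem.List.pyRange 0 (PySem.Str.len sequence - k + 1) 1).map
            (fun i => PySem.Str.slice sequence (some i) (some (i + k)))).foldl
            (fun d x => d.modify x 0 (· + 1)) d) := by
    funext d k
    rw [List.foldl_map]
    congr 1
    funext d' i
    exact pv_stepA d' _
  have hstep :
      (PySem.List.pyRange k_min (PySem.Str.len sequence) 1).foldl (fun d k =>
        (PySem.List.pyRange 0 (PySem.Str.len sequence - k + 1) 1).foldl (fun d i =>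
          let kmer := PySem.Str.slice sequence (some i) (some (i + k))
          if d.contains kmer then d.modify kmer 0 (· + 1) else d.insert kmer 1) d)
        (PySem.Dict.empty : PySem.Dict String Int)
      = PySem.Dict.counter (pvSubs sequence k_min) := by
    rw [hfun]
    rw [← List.foldl_flatMap]
    rfl
  rw [hstep, pv_foldl_if_filter, pv_items_fresh, PySem.Dict.items_counter]
  · rfl
  · rw [PySem.Dict.items_counter]
    exact pv_nodup_fst_canon _

lemma pv_B_eq_canon (sequence : String) (k_min : Int) :
    count_kmers_alt sequence k_min = pvCanon (pvSubs sequence k_min) := by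
  unfold count_kmers_alt
  have hruns : pvRuns (pvSubs sequence k_min) = pvCanon (pvSubs sequence k_min) :=
    pvRuns_eq_canon _ _ (Nat.le_refl _)
  show (PySem.Dict.ofList (pvRuns (pvSubs sequence k_min))).items = _
  rw [hruns]
  show ((pvCanon (pvSubs sequence k_min)).foldl (fun d p => d.insert p.1 p.2)
      (PySem.Dict.empty : PySem.Dict String Int)).items = _
  exact pv_items_fresh _ (pv_nodup_fst_canon _)

-- ===== VERDICT (by name: the statement is the Claim_ definition above) =====
theorem count_kmers_spec : Claim_equal_count_kmers := by
  intro sequence k_min _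
  show count_kmers sequence k_min = count_kmers_alt sequence k_min
  rw [pv_A_eq_canon, pv_B_eq_canon]
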